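-- pv_equiv track=rewrite | github.com/Hello20051021/reimagined-fiesta | 高精度计算器/a.py | yx
-- ===== SOURCE A (Python) =====
-- def yx(a):
--     b=0
--     c=[]
--     for i in a:
--         if (i=="("):
--             b+=3
--         if (i in "*/"):
--             b+=2
--             c.append(b)
--             b-=2
--         if (i in "+-"):
--             b+=1
--             c.append(b)
--             b-=1
--         if (i==")"):
--             b-=3
--     return c
-- ===== SOURCE B (Python) =====
-- def yx(a):
--     # pass 1: cumulative parenthesis depth (scaled by 3) including the current char
--     depths = []
--     d = 0
--     for ch in a:
--         d += 3 if ch == '(' else -3 if ch == ')' else 0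
--         depths.append(d)
--     # pass 2: map the profile to priorities at operator positions only
--     return [d + (2 if ch in '*/' else 1) for ch, d in zip(a, depths) if ch in '*/+-']
-- ===== Notes on version B (the rewrite author's own statement) =====
-- stated objective: alternative
-- what changed: Replaces A's single interleaved depth-accumulator loop (with append/undo inside each operator branch) by a two-phase decomposition: first build the cumulative parenthesis-depth profile of the whole string, then map that profile to priorities at operator positions with a comprehension.
import Mathlib
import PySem

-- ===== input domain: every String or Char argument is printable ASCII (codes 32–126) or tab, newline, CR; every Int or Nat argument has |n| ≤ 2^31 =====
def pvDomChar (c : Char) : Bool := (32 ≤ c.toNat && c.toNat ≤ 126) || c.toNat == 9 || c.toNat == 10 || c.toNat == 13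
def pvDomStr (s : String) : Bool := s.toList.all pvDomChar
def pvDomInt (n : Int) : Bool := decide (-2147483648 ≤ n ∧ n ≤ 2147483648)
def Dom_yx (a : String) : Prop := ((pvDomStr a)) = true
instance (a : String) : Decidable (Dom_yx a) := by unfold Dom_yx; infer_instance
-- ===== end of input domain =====

-- B replaces A's interleaved accumulator loop by a depth-profile pass followed by a map; alternative decomposition, same cost.

-- ===== PORT A =====
-- one step of A's loop body: the four successive if-statements over state (b, c)
def yxF (bc : Int × List Int) (i : Char) : Int × List Int :=
  let b := bc.1
  let c := bc.2
  let b := if i = '(' then b + 3 else b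
  let bc :=
    if i = '*' ∨ i = '/' then
      let b := b + 2
      let c := c ++ [b]
      (b - 2, c)
    else (b, c)
  let b := bc.1
  let c := bc.2
  let bc :=
    if i = '+' ∨ i = '-' then
      let b := b + 1
      let c := c ++ [b]
      (b - 1, c)
    else (b, c)
  let b := bc.1
  let c := bc.2
  let b := if i = ')' then b - 3 else b
  (b, c)

def yx (a : String) : List Int :=
  (a.toList.foldl yxF (0, [])).2

-- ===== PORT B =====
-- parenthesis delta of one character
def yxDelta (ch : Char) : Int := if ch = '(' then 3 else if ch = ')' then -3 else 0

-- pass 1: cumulative depths including the current char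
def yxDepths : List Char → Int → List Int
  | [], _ => []
  | ch :: rest, d => (d + yxDelta ch) :: yxDepths rest (d + yxDelta ch)

-- pass 2: the comprehension's per-element function
def yxG (p : Char × Int) : Option Int :=
  if p.1 = '*' ∨ p.1 = '/' ∨ p.1 = '+' ∨ p.1 = '-' then
    some (p.2 + (if p.1 = '*' ∨ p.1 = '/' then 2 else 1))
  else none

def yx_alt (a : String) : List Int :=
  (a.toList.zip (yxDepths a.toList 0)).filterMap yxG

-- ===== PRECONDITION & SPEC =====
def Spec_yx (a : String) (out : List Int) : Prop := out = yx_alt a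
instance (a : String) (out : List Int) : Decidable (Spec_yx a out) := by unfold Spec_yx; infer_instance

-- ===== CLAIM (what is proved, stated in full; the proofs are below) =====
def Claim_equal_yx : Prop := ∀ (a : String), Dom_yx a → Spec_yx a (yx a)

-- ===== LEMMAS AND PROOFS =====
lemma yx_key : ∀ (l : List Char) (b : Int) (c : List Int),
    (l.foldl yxF (b, c)).2 = c ++ (l.zip (yxDepths l b)).filterMap yxG := by
  intro l
  induction l with
  | nil => simp [yxDepths]
  | cons ch l ih =>
    intro b c
    simp only [List.foldl_cons, yxDepths, List.zip_cons_cons, List.filterMap_cons]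
    by_cases h1 : ch = '(' <;> by_cases h2 : ch = '*' ∨ ch = '/' <;>
      by_cases h3 : ch = '+' ∨ ch = '-' <;> by_cases h4 : ch = ')' <;>
      simp_all [yxF, yxG, yxDelta, List.append_assoc, sub_eq_add_neg] <;>
      rcases h2 with h2 | h2 <;> rcases h3 with h3 | h3 <;> simp_all

-- ===== VERDICT (by name: the statement is the Claim_ definition above) =====
theorem yx_spec : Claim_equal_yx := by
  intro a _
  show yx a = yx_alt a
  simp [yx, yx_alt, yx_key]
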